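-- pv_equiv track=rewrite | github.com/HappytestR/--- | ICS2020/algorithmtest/biaoqian.py | RecommendBQ2
-- ===== SOURCE A (Python) =====
-- import operator
--
-- def InitStat(records):  #从records中统计出user_tags和tag_items
--     user_tags=dict()  #records是存储标签的三元组records[i]=[user,item,tag]
--     tag_items=dict()
--     user_items=dict()
--     for user,item in records.items():
--         key1=records[user].keys()
--         for j in key1:
--             key2=records[user][j]
--             for tag in key2:
--                 user_tags.setdefault(user,{})
--                 user_tags[user][tag]=1
--                 tag_items.setdefault(tag,{})
--                 tag_items[tag][j]=1
--                 user_items.setdefault(user,{})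
--                 user_items[user][j]=1
--     return user_tags,user_items,tag_items
--
-- def RecommendBQ1(user,records):
--     recommend_items=dict()
--     user_tags,user_items,tag_items=InitStat(records)
--     tagged_items=user_items[user]
--     for tag,wut in user_tags[user].items():
--         for item,wti in tag_items[tag].items():
--             if item in tagged_items:
--                 continue
--             if item not in recommend_items:
--                 recommend_items[item]=wut*wti
--             else:
--                 recommend_items[item]+=wut*wti
--     return recommend_items
--
-- def RecommendBQ2(records,N):  #N设置的为阈值，输入为0-10
--     recommend={}
--     users=records.keys()
--     Recomendation={}
--     for i in users:
--         Recomendation[i]=set()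
--         rank=RecommendBQ1(i,records)
--         R=sorted(rank.items(),key=operator.itemgetter(1),reverse=True)[0:N]
--         for j,item in R:
--             Recomendation[i].add(j)
--     return Recomendation
-- ===== SOURCE B (Python) =====
-- import operator
--
-- def RecommendBQ2(records, N):
--     # Build the tag statistics ONCE (A rebuilds them via InitStat for every user).
--     user_tags = {}
--     tag_items = {}
--     user_items = {}
--     for user, items in records.items():
--         for item, tags in items.items():
--             for tag in tags:
--                 user_tags.setdefault(user, {})[tag] = 1
--                 tag_items.setdefault(tag, {})[item] = 1
--                 user_items.setdefault(user, {})[item] = 1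
--     Recomendation = {}
--     for user in records:
--         owned = user_items[user]
--         rank = {}
--         for tag in user_tags[user]:
--             for item in tag_items[tag]:
--                 if item not in owned:
--                     rank[item] = rank.get(item, 0) + 1
--         top = sorted(rank.items(), key=operator.itemgetter(1), reverse=True)[0:N]
--         Recomendation[user] = {item for item, _ in top}
--     return Recomendation
-- ===== Notes on version B (the rewrite author's own statement) =====
-- stated objective: faster
-- what changed: B builds the user_tags/user_items/tag_items statistics in one pass over the records instead of recomputing InitStat from scratch for every user, and counts ranks with a single get-based dict update instead of A's insert/accumulate branching on weights.
import Mathlib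
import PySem

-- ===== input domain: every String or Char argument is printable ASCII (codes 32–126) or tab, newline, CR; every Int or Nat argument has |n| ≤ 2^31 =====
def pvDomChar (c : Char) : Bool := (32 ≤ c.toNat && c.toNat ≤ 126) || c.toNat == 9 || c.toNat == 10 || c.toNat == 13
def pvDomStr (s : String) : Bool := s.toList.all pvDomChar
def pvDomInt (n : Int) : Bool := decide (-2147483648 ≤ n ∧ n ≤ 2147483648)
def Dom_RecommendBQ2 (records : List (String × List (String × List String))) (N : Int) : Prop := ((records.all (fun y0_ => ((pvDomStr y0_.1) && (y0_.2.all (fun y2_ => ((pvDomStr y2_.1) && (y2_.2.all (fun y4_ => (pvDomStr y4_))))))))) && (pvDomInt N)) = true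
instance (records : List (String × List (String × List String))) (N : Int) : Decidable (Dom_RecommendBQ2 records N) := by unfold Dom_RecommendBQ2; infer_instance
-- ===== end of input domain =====

-- B is a one-pass re-implementation: it builds the tag statistics ONCE instead of per user
-- (A recomputes InitStat for every user), and counts ranks with a single get-based update.
-- Equivalence of return values is proved on Pre_ (valid dict representation, every user has a tag).

-- ===== PORT A =====
abbrev pvStTy : Type :=
  PySem.Dict String (PySem.Dict String Int) × PySem.Dict String (PySem.Dict String Int) ×
    PySem.Dict String (PySem.Dict String Int)

-- InitStat(records): builds user_tags, user_items, tag_items (dicts of dicts, all stored weights 1).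
def InitStat (records : List (String × List (String × List String))) : pvStTy :=
  records.foldl (fun (st : pvStTy) p =>
    -- for user, item in records.items():  (item unused; records[user] is a dict lookup)
    match (PySem.Dict.mk records).get? p.1 with
    | none => st          -- unreachable: p.1 is a key of records
    | some udict =>
      ((PySem.Dict.mk udict).keys).foldl (fun (st : pvStTy) j =>
        match (PySem.Dict.mk udict).get? j with
        | none => st      -- unreachable: j is a key of udict
        | some key2 =>
          key2.foldl (fun (st : pvStTy) tag =>
            ((st.1.setdefault p.1 PySem.Dict.empty).modify p.1 PySem.Dict.empty (fun d => d.insert tag 1),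
             (st.2.1.setdefault p.1 PySem.Dict.empty).modify p.1 PySem.Dict.empty (fun d => d.insert j 1),
             (st.2.2.setdefault tag PySem.Dict.empty).modify tag PySem.Dict.empty (fun d => d.insert j 1)))
            st)
        st)
    (PySem.Dict.empty, PySem.Dict.empty, PySem.Dict.empty)

-- RecommendBQ1(user, records): none = Python KeyError (user missing from user_items/user_tags).
def RecommendBQ1 (user : String) (records : List (String × List (String × List String))) :
    Option (PySem.Dict String Int) :=
  let s := InitStat records
  match s.2.1.get? user with      -- tagged_items = user_items[user]
  | none => none
  | some tagged_items =>
    match s.1.get? user with      -- user_tags[user].items()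
    | none => none
    | some utags =>
      some (utags.items.foldl (fun (rec : PySem.Dict String Int) tw =>
        match s.2.2.get? tw.1 with   -- tag_items[tag].items()
        | none => rec               -- unreachable: every tag of a user is in tag_items
        | some tid =>
          tid.items.foldl (fun rec iw =>
            if tagged_items.contains iw.1 then rec
            else if rec.contains iw.1 = false then rec.insert iw.1 (tw.2 * iw.2)
            else rec.modify iw.1 0 (fun v => v + tw.2 * iw.2)) rec) PySem.Dict.empty)

def RecommendBQ2 (records : List (String × List (String × List String))) (N : Int) :
    List (String × List String) :=
  (((PySem.Dict.mk records).keys).foldl (fun (Rec : PySem.Dict String (List String)) i =>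
      let Rec := Rec.insert i ([] : List String)           -- Recomendation[i] = set()
      match RecommendBQ1 i records with
      | none => Rec                                        -- (Python would have raised)
      | some rank =>
        let R := PySem.List.slice (PySem.List.sorted rank.items (fun p => p.2) true) (some 0) (some N)
        R.foldl (fun Rec jw => Rec.modify i [] (fun s => PySem.Set.add s jw.1)) Rec)
    PySem.Dict.empty).items

-- ===== PORT B =====
-- X.setdefault(k, {})[t] = 1
def pvUpd (d : PySem.Dict String (PySem.Dict String Int)) (k t : String) :
    PySem.Dict String (PySem.Dict String Int) :=
  (d.setdefault k PySem.Dict.empty).modify k PySem.Dict.empty (fun inner => inner.insert t 1)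

-- B's single stats pass (state = (user_tags, user_items, tag_items)).
def pvStats (records : List (String × List (String × List String))) : pvStTy :=
  records.foldl (fun (st : pvStTy) p =>
    p.2.foldl (fun st q =>
      q.2.foldl (fun st tag =>
        (pvUpd st.1 p.1 tag, pvUpd st.2.1 p.1 q.1, pvUpd st.2.2 tag q.1)) st) st)
    (PySem.Dict.empty, PySem.Dict.empty, PySem.Dict.empty)

def RecommendBQ2_alt (records : List (String × List (String × List String))) (N : Int) :
    List (String × List String) :=
  let s := pvStats records
  (records.foldl (fun (Rec : PySem.Dict String (List String)) p =>
      match s.2.1.get? p.1 with          -- owned = user_items[user]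
      | none => Rec                      -- (Python would have raised)
      | some owned =>
        match s.1.get? p.1 with          -- user_tags[user]
        | none => Rec
        | some utags =>
          let rank := utags.keys.foldl (fun (rank : PySem.Dict String Int) tag =>
            match s.2.2.get? tag with    -- tag_items[tag]
            | none => rank
            | some tid =>
              tid.keys.foldl (fun rank item =>
                if owned.contains item then rank
                else rank.insert item (rank.getD item 0 + 1)) rank) PySem.Dict.empty
          let top := PySem.List.slice (PySem.List.sorted rank.items (fun p => p.2) true) (some 0) (some N)
          Rec.insert p.1 (PySem.Set.ofList (top.map Prod.fst)))
    PySem.Dict.empty).items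

-- ===== PRECONDITION & SPEC =====
-- Pre_: the assoc lists faithfully represent Python dicts (no duplicate keys — a Python dict
-- cannot contain any), and every user has at least one item with a nonempty tag list: on users
-- without any tag, Python's A raises KeyError('user') in RecommendBQ1 (and B raises it too).
def Pre_RecommendBQ2 (records : List (String × List (String × List String))) (N : Int) : Prop :=
  (records.map Prod.fst).Nodup ∧
  (∀ p ∈ records, (p.2.map Prod.fst).Nodup) ∧
  (∀ p ∈ records, ∃ q ∈ p.2, q.2 ≠ [])
instance (records : List (String × List (String × List String))) (N : Int) : Decidable (Pre_RecommendBQ2 records N) := by unfold Pre_RecommendBQ2; infer_instance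

def pvWitness_RecommendBQ2 : (List (String × List (String × List String))) × Int :=
  ([("u1", [("i1", ["t1", "t2"]), ("i2", ["t1"])]), ("u2", [("i3", ["t1"])])], 3)

def Spec_RecommendBQ2 (records : List (String × List (String × List String))) (N : Int) (out : List (String × List String)) : Prop := out = RecommendBQ2_alt records N
instance (records : List (String × List (String × List String))) (N : Int) (out : List (String × List String)) : Decidable (Spec_RecommendBQ2 records N out) := by unfold Spec_RecommendBQ2; infer_instance

-- ===== CLAIM (what is proved, stated in full; the proofs are below) =====
def Claim_equal_RecommendBQ2 : Prop := ∀ (records : List (String × List (String × List String))) (N : Int), Dom_RecommendBQ2 records N → Pre_RecommendBQ2 records N → Spec_RecommendBQ2 records N (RecommendBQ2 records N)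

-- ===== LEMMAS AND PROOFS =====

theorem pv_modify_eq_insert {ν : Type} (d : PySem.Dict String ν) (k : String) (d0 : ν) (f : ν → ν) :
    d.modify k d0 f = d.insert k (f (d.getD k d0)) := rfl

theorem pv_foldl_inv {α σ : Type} (P : σ → Prop) (f : σ → α → σ) (l : List α) (s : σ)
    (h0 : P s) (hstep : ∀ s a, P s → P (f s a)) : P (l.foldl f s) := by
  induction l generalizing s with
  | nil => exact h0
  | cons a t ih => exact ih _ (hstep _ _ h0)

-- lookups / membership through pvUpd
theorem pv_get?_upd (d : PySem.Dict String (PySem.Dict String Int)) (k t u : String) :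
    (pvUpd d k t).get? u =
      if u = k then some ((d.getD k PySem.Dict.empty).insert t 1) else d.get? u := by
  unfold pvUpd
  rw [pv_modify_eq_insert, PySem.Dict.get?_insert]
  split_ifs with h
  · rw [PySem.Dict.getD_setdefault_self]
  · rw [PySem.Dict.get?_setdefault_of_ne _ _ h]

theorem pv_getD_upd (d : PySem.Dict String (PySem.Dict String Int)) (k t u : String) :
    (pvUpd d k t).getD u PySem.Dict.empty =
      if u = k then (d.getD k PySem.Dict.empty).insert t 1 else d.getD u PySem.Dict.empty := by
  rw [PySem.Dict.getD_eq_get?_getD, pv_get?_upd]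
  split_ifs <;> simp [PySem.Dict.getD_eq_get?_getD]

theorem pv_contains_upd (d : PySem.Dict String (PySem.Dict String Int)) (k t u : String) :
    (pvUpd d k t).contains u = (u == k || d.contains u) := by
  unfold pvUpd
  rw [pv_modify_eq_insert, PySem.Dict.contains_insert, PySem.Dict.contains_setdefault]
  cases h : (u == k) <;> simp

theorem pv_contains_upd_self (d : PySem.Dict String (PySem.Dict String Int)) (k t : String) :
    (pvUpd d k t).contains k = true := by
  rw [pv_contains_upd]; simp

theorem pv_contains_upd_mono (d : PySem.Dict String (PySem.Dict String Int)) (k t u : String)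
    (h : d.contains u = true) : (pvUpd d k t).contains u = true := by
  rw [pv_contains_upd, h]; simp

-- A's InitStat computes exactly B's single pass (valid dict representation).
theorem pv_initStat_eq_stats (records : List (String × List (String × List String)))
    (h1 : (records.map Prod.fst).Nodup) (h2 : ∀ p ∈ records, (p.2.map Prod.fst).Nodup) :
    InitStat records = pvStats records := by
  unfold InitStat pvStats
  refine PySem.List.foldl_congr_mem records _ _ _ ?_
  intro st p hp
  have hget : (PySem.Dict.mk records).get? p.1 = some p.2 :=
    PySem.Dict.get?_of_mem_items _ (by simpa using hp) h1
  rw [hget]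
  show ((p.2.map Prod.fst).foldl _ st) = _
  rw [List.foldl_map]
  refine PySem.List.foldl_congr_mem p.2 _ _ _ ?_
  intro st q hq
  have hget2 : (PySem.Dict.mk p.2).get? q.1 = some q.2 :=
    PySem.Dict.get?_of_mem_items _ (by simpa using hq) (h2 p hp)
  rw [hget2]
  rfl

-- every weight stored in user_tags / tag_items is 1
def pvOnes (d : PySem.Dict String (PySem.Dict String Int)) : Prop :=
  ∀ u : String, ∀ v ∈ (d.getD u PySem.Dict.empty).values, v = (1 : Int)

theorem pv_ones_upd (d : PySem.Dict String (PySem.Dict String Int)) (k t : String)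
    (h : pvOnes d) : pvOnes (pvUpd d k t) := by
  intro u v hv
  rw [pv_getD_upd] at hv
  split_ifs at hv with hu
  · rcases PySem.Dict.mem_values_insert _ _ _ _ hv with h1 | h1
    · exact h1
    · exact h k v h1
  · exact h u v hv

theorem pv_ones_empty : pvOnes (PySem.Dict.empty : PySem.Dict String (PySem.Dict String Int)) := by
  intro u v hv
  rw [PySem.Dict.getD_eq_get?_getD, PySem.Dict.get?_empty] at hv
  exact absurd hv (by simp [PySem.Dict.values, PySem.Dict.empty])

theorem pv_stats_ones (records : List (String × List (String × List String))) :
    pvOnes (pvStats records).1 ∧ pvOnes (pvStats records).2.2 := by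
  unfold pvStats
  refine pv_foldl_inv (fun (st : pvStTy) => pvOnes st.1 ∧ pvOnes st.2.2) _ _ _
    ⟨pv_ones_empty, pv_ones_empty⟩ ?_
  intro st p hst
  refine pv_foldl_inv (fun (st : pvStTy) => pvOnes st.1 ∧ pvOnes st.2.2) _ _ _ hst ?_
  intro st q hst
  refine pv_foldl_inv (fun (st : pvStTy) => pvOnes st.1 ∧ pvOnes st.2.2) _ _ _ hst ?_
  intro st tag hst
  exact ⟨pv_ones_upd _ _ _ hst.1, pv_ones_upd _ _ _ hst.2⟩

-- C u st: user u is present in user_tags and user_items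
def pvHasU (u : String) (st : pvStTy) : Prop :=
  st.1.contains u = true ∧ st.2.1.contains u = true

theorem pv_hasU_tagstep (u a b c d e f : String) (st : pvStTy) (h : pvHasU u st) :
    pvHasU u (pvUpd st.1 a b, pvUpd st.2.1 c d, pvUpd st.2.2 e f) :=
  ⟨pv_contains_upd_mono _ _ _ _ h.1, pv_contains_upd_mono _ _ _ _ h.2⟩

theorem pv_hasU_itemfold (u user : String) (items : List (String × List String)) (st : pvStTy)
    (h : pvHasU u st) :
    pvHasU u (items.foldl (fun st q =>
      q.2.foldl (fun st tag =>
        (pvUpd st.1 user tag, pvUpd st.2.1 user q.1, pvUpd st.2.2 tag q.1)) st) st) := by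
  refine pv_foldl_inv _ _ _ _ h ?_
  intro st q hst
  refine pv_foldl_inv _ _ _ _ hst ?_
  intro st tag hst
  exact pv_hasU_tagstep _ _ _ _ _ _ _ _ hst

theorem pv_hasU_userstep (user : String) (items : List (String × List String)) (st : pvStTy)
    (hq : ∃ q ∈ items, q.2 ≠ []) :
    pvHasU user (items.foldl (fun st q =>
      q.2.foldl (fun st tag =>
        (pvUpd st.1 user tag, pvUpd st.2.1 user q.1, pvUpd st.2.2 tag q.1)) st) st) := by
  induction items generalizing st with
  | nil => rcases hq with ⟨q, hq, _⟩; cases hq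
  | cons q tl ih =>
    rcases hq with ⟨q', hq', hne⟩
    rcases List.mem_cons.mp hq' with rfl | hmem
    · -- the head item carries a tag: after its tag loop the user is present; stays present
      rw [List.foldl_cons]
      refine pv_hasU_itemfold _ _ _ _ ?_
      rcases q' with ⟨i, tags⟩
      cases tags with
      | nil => exact absurd rfl hne
      | cons t ts =>
        rw [List.foldl_cons]
        refine pv_foldl_inv _ _ _ _ ?_ (fun st tag h => pv_hasU_tagstep _ _ _ _ _ _ _ _ h)
        exact ⟨pv_contains_upd_self _ _ _, pv_contains_upd_self _ _ _⟩
    · rw [List.foldl_cons]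
      exact ih _ ⟨q', hmem, hne⟩

-- a user with at least one tagged item is present in user_tags and user_items
theorem pv_stats_contains (records : List (String × List (String × List String)))
    (p : String × List (String × List String)) (hp : p ∈ records)
    (hq : ∃ q ∈ p.2, q.2 ≠ []) :
    (pvStats records).1.contains p.1 = true ∧ (pvStats records).2.1.contains p.1 = true := by
  show pvHasU p.1 (pvStats records)
  unfold pvStats
  generalize ((PySem.Dict.empty, PySem.Dict.empty, PySem.Dict.empty) : pvStTy) = st
  induction records generalizing st with
  | nil => cases hp
  | cons hd tl ih =>
    rw [List.foldl_cons]
    rcases List.mem_cons.mp hp with rfl | hmem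
    · refine pv_foldl_inv _ _ _ _ (pv_hasU_userstep _ _ _ hq) ?_
      intro st a h
      exact pv_hasU_itemfold _ _ _ _ h
    · exact ih hmem _

-- the two rank loops agree when all stored weights are 1
theorem pv_rank_eq (ti : PySem.Dict String (PySem.Dict String Int))
    (utags tagged : PySem.Dict String Int)
    (hut : ∀ v ∈ utags.values, v = (1 : Int))
    (hti : ∀ tag tid, ti.get? tag = some tid → ∀ v ∈ tid.values, v = (1 : Int)) :
    utags.items.foldl (fun (rec : PySem.Dict String Int) tw =>
        match ti.get? tw.1 with
        | none => rec
        | some tid =>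
          tid.items.foldl (fun rec iw =>
            if tagged.contains iw.1 then rec
            else if rec.contains iw.1 = false then rec.insert iw.1 (tw.2 * iw.2)
            else rec.modify iw.1 0 (fun v => v + tw.2 * iw.2)) rec) PySem.Dict.empty
      = utags.keys.foldl (fun (rank : PySem.Dict String Int) tag =>
        match ti.get? tag with
        | none => rank
        | some tid =>
          tid.keys.foldl (fun rank item =>
            if tagged.contains item then rank
            else rank.insert item (rank.getD item 0 + 1)) rank) PySem.Dict.empty := by
  show _ = (utags.items.map Prod.fst).foldl _ _
  rw [List.foldl_map]
  refine PySem.List.foldl_congr_mem utags.items _ _ _ ?_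
  intro rec tw htw
  have h1 : tw.2 = 1 := hut tw.2 (List.mem_map_of_mem htw)
  cases hti' : ti.get? tw.1 with
  | none => simp only
  | some tid =>
    simp only
    show _ = (tid.items.map Prod.fst).foldl _ _
    rw [List.foldl_map]
    refine PySem.List.foldl_congr_mem tid.items _ _ _ ?_
    intro rank iw hiw
    have h2 : iw.2 = 1 := hti _ _ hti' iw.2 (List.mem_map_of_mem hiw)
    by_cases hc : tagged.contains iw.1 = true
    · simp [hc]
    · rw [Bool.not_eq_true] at hc
      cases hr : rank.contains iw.1
      · simp [hc, hr, h1, h2, PySem.Dict.getD_of_not_contains]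
      · simp [hc, h1, h2, pv_modify_eq_insert]

-- adding R's keys one by one into Recomendation[i] = building the whole set and inserting it
theorem pv_fold_add_aux (R : List (String × Int)) (i : String) :
    ∀ (Rec : PySem.Dict String (List String)) (v : List String),
    R.foldl (fun Rec jw => Rec.modify i [] (fun s => PySem.Set.add s jw.1)) (Rec.insert i v) =
      Rec.insert i (R.foldl (fun s jw => PySem.Set.add s jw.1) v) := by
  induction R with
  | nil => intro Rec v; rfl
  | cons jw R ih =>
    intro Rec v
    rw [List.foldl_cons, pv_modify_eq_insert, PySem.Dict.getD_insert_self,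
      PySem.Dict.insert_insert_self, ih, List.foldl_cons]

theorem pv_fold_add_eq_insert_set (R : List (String × Int))
    (Rec : PySem.Dict String (List String)) (i : String) :
    R.foldl (fun Rec jw => Rec.modify i [] (fun s => PySem.Set.add s jw.1)) (Rec.insert i []) =
      Rec.insert i (PySem.Set.ofList (R.map Prod.fst)) := by
  rw [pv_fold_add_aux, PySem.Set.ofList_eq_foldl, List.foldl_map]

-- ===== VERDICT (by name: the statement is the Claim_ definition above) =====
theorem RecommendBQ2_spec : Claim_equal_RecommendBQ2 := by
  intro records N _ hpre
  obtain ⟨h1, h2, h3⟩ := hpre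
  show RecommendBQ2 records N = RecommendBQ2_alt records N
  unfold RecommendBQ2 RecommendBQ2_alt
  simp only []
  congr 1
  show ((records.map Prod.fst).foldl _ _) = _
  rw [List.foldl_map]
  refine PySem.List.foldl_congr_mem records _ _ _ ?_
  intro Rec p hp
  -- the user p.1 is present in user_items and user_tags
  obtain ⟨hcu, hci⟩ := pv_stats_contains records p hp (h3 p hp)
  rw [PySem.Dict.contains_eq_isSome_get?, Option.isSome_iff_exists] at hcu hci
  obtain ⟨utags, hutags⟩ := hcu
  obtain ⟨owned, howned⟩ := hci
  have hBQ1 : RecommendBQ1 p.1 records =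
      some (utags.items.foldl (fun (rec : PySem.Dict String Int) tw =>
        match (pvStats records).2.2.get? tw.1 with
        | none => rec
        | some tid =>
          tid.items.foldl (fun rec iw =>
            if owned.contains iw.1 then rec
            else if rec.contains iw.1 = false then rec.insert iw.1 (tw.2 * iw.2)
            else rec.modify iw.1 0 (fun v => v + tw.2 * iw.2)) rec) PySem.Dict.empty) := by
    unfold RecommendBQ1
    rw [pv_initStat_eq_stats records h1 h2]
    simp only [howned, hutags]
  rw [hBQ1, howned, hutags]
  simp only []
  have hones := pv_stats_ones records
  have hrank := pv_rank_eq (pvStats records).2.2 utags owned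
    (by
      have : (pvStats records).1.getD p.1 PySem.Dict.empty = utags :=
        PySem.Dict.getD_of_get?_eq_some _ _ hutags
      rw [← this]; exact fun v hv => hones.1 p.1 v hv)
    (by
      intro tag tid htid v hv
      have : (pvStats records).2.2.getD tag PySem.Dict.empty = tid :=
        PySem.Dict.getD_of_get?_eq_some _ _ htid
      rw [← this] at hv; exact hones.2 tag v hv)
  rw [hrank]
  exact pv_fold_add_eq_insert_set _ _ _
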